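-- pv_equiv track=rewrite | github.com/YashB63/GFG-Daily-Questions | Day 763/Pairs with Positive Negative values/pairs_with_positive_negative_values.py | posNegPair
-- ===== SOURCE A (Python) =====
-- def posNegPair(arr):
--     freq={}
--
--     for num in arr:
--         if(num in freq):
--             freq[num]+=1
--         else:
--             freq[num]=1
--
--     negatives=sorted([num for num in freq if(num<0)],key=abs)
--     ans=[]
--
--     for num in negatives:
--         if(-num in freq):
--             min_value=min(freq[num],freq[-num])
--
--             for _ in range(min_value):
--                 ans.append(num)
--                 ans.append(-num)
--
--     return ans
-- ===== SOURCE B (Python) =====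
-- def posNegPair(arr):
--     s = sorted(arr, key=abs)
--     ans = []
--     i = 0
--     n = len(s)
--     while i < n:
--         j = i
--         while j < n and abs(s[j]) == abs(s[i]):
--             j += 1
--         if s[i] != 0:
--             group = s[i:j]
--             negs = [x for x in group if x < 0]
--             poss = [x for x in group if x > 0]
--             for x, y in zip(negs, poss):
--                 ans.append(x)
--                 ans.append(y)
--         i = j
--     return ans
-- ===== Notes on version B (the rewrite author's own statement) =====
-- stated objective: alternative
-- what changed: B drops A's frequency dict entirely: it sorts the whole array once by absolute value, scans it group by group (runs of equal absolute value), and pairs each group's negatives with its positives by zipping the two sign-partitioned sublists, so no counting structure and no separate sort of the negative keys exist.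
import Mathlib
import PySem

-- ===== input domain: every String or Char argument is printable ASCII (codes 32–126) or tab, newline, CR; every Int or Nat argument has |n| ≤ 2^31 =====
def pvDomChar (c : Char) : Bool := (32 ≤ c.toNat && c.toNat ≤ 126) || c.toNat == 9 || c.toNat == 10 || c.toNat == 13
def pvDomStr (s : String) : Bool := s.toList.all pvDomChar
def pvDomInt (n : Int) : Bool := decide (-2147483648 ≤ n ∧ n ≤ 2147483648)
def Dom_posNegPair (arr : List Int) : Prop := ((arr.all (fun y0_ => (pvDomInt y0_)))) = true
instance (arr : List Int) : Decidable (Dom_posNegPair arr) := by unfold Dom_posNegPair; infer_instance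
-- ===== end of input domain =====

-- B replaces A's frequency dict entirely: it sorts the whole array once by absolute value,
-- scans it group by group (equal absolute value), and pairs the group's negatives with its
-- positives by zipping the two sign-partitioned sublists; objective: alternative.


-- ===== PORT A =====
-- literal transliteration of Source A: counting dict, sort of negative keys by abs, pair emission loop.
-- freq[num] on a present key is ported as getD num 0 (num is always a key where A reads it).
def posNegPair (arr : List Int) : List Int :=
  let freq := arr.foldl
    (fun d num => if d.contains num then d.insert num (d.getD num 0 + 1) else d.insert num (1 : Int))
    PySem.Dict.empty
  let negatives := PySem.List.sorted (freq.keys.filter (fun num => decide (num < 0))) (fun n => |n|)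
  negatives.foldl
    (fun ans num =>
      if freq.contains (-num) then
        let min_value := min (freq.getD num 0) (freq.getD (-num) 0)
        (PySem.List.pyRange 0 min_value).foldl (fun a _ => a ++ [num] ++ [-num]) ans
      else ans) []

-- ===== PORT B =====
-- transliteration of Source B's outer while-loop: peel off the leading group of equal absolute
-- value (the inner j-advancing loop = takeWhile / dropWhile on the abs-sorted list), zip the
-- group's negatives with its positives, append each pair, recurse on the remainder.
def pvScanB : List Int → List Int
  | [] => []
  | x :: rest =>
    let g := (x :: rest).takeWhile (fun y => |y| == |x|)
    let negs := g.filter (fun v => decide (v < 0))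
    let poss := g.filter (fun v => decide (0 < v))
    (if x ≠ 0 then (negs.zip poss).foldl (fun a p => a ++ [p.1, p.2]) [] else []) ++
      pvScanB ((x :: rest).dropWhile (fun y => |y| == |x|))
termination_by s => s.length
decreasing_by
  simp only [List.dropWhile_cons, beq_self_eq_true, if_true]
  have := List.length_dropWhile_le (fun y => |y| == |x|) rest
  simp only [List.length_cons]
  omega

def posNegPair_alt (arr : List Int) : List Int :=
  pvScanB (PySem.List.sorted arr (fun x => |x|))

-- ===== PRECONDITION & SPEC =====
def Spec_posNegPair (arr : List Int) (out : List Int) : Prop := out = posNegPair_alt arr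
instance (arr : List Int) (out : List Int) : Decidable (Spec_posNegPair arr out) := by unfold Spec_posNegPair; infer_instance

-- ===== CLAIM (what is proved, stated in full; the proofs are below) =====
def Claim_equal_posNegPair : Prop := ∀ (arr : List Int), Dom_posNegPair arr → Spec_posNegPair arr (posNegPair arr)

-- ===== LEMMAS AND PROOFS =====

-- A's counting loop is Counter(arr)
theorem pvFreq_eq_counter (arr : List Int) :
    arr.foldl
      (fun d num => if d.contains num then d.insert num (d.getD num 0 + 1) else d.insert num (1 : Int))
      PySem.Dict.empty = PySem.Dict.counter arr := by
  rw [← PySem.Dict.foldl_insert_getD_add_one_eq_counter]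
  apply PySem.List.foldl_congr_mem
  intro d x _
  by_cases h : d.contains x = true
  · simp [h]
  · simp only [Bool.not_eq_true] at h
    simp [h, PySem.Dict.getD_of_not_contains d 0 h]

-- a flatMap of a constant over a list
theorem pvFlatMap_const {α β : Type} (l : List α) (c : List β) :
    l.flatMap (fun _ => c) = (List.replicate l.length c).flatten := by
  induction l with
  | nil => rfl
  | cons x t ih => simp [List.flatMap_cons, ih, List.replicate_succ]

-- A's inner pair-emitting loop is list repetition
theorem pvInner_loop (m : Int) (x y : Int) (acc : List Int) :
    (PySem.List.pyRange 0 m).foldl (fun a _ => a ++ [x] ++ [y]) acc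
      = acc ++ PySem.List.pyRepeat [x, y] m := by
  have h1 : (PySem.List.pyRange 0 m).foldl (fun a _ => a ++ [x] ++ [y]) acc
      = (PySem.List.pyRange 0 m).foldl (fun a _ => a ++ [x, y]) acc := by
    apply PySem.List.foldl_congr_mem; intro a _ _; simp
  rw [h1, PySem.List.foldl_append_eq_flatMap (fun _ => [x, y]),
      pvFlatMap_const, PySem.List.length_pyRange_one]
  simp [PySem.List.pyRepeat]

-- dropping elements whose flatMap contribution is empty
theorem pvFlatMap_filter {α β : Type} (l : List α) (p : α → Prop) [DecidablePred p]
    (f : α → List β) (h : ∀ x ∈ l, ¬ p x → f x = []) :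
    l.flatMap f = (l.filter (fun x => decide (p x))).flatMap f := by
  induction l with
  | nil => rfl
  | cons x t ih =>
    by_cases hx : p x
    · simp [List.flatMap_cons, hx,
        ih (fun y hy => h y (List.mem_cons_of_mem _ hy))]
    · simp [List.flatMap_cons, hx, h x (List.mem_cons_self) hx,
        ih (fun y hy => h y (List.mem_cons_of_mem _ hy))]

-- the emission for one value as a function of the abs value a
def pvEmit (arr : List Int) (a : Int) : List Int :=
  PySem.List.pyRepeat [-a, a] (min ((arr.count (-a) : Int)) ((arr.count a : Int)))

theorem pvEmit_of_not_mem (arr : List Int) (a : Int) (h : (-a) ∉ arr) :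
    pvEmit arr a = [] := by
  have hm : min ((arr.count (-a) : Int)) ((arr.count a : Int)) = 0 := by
    have h0 : arr.count (-a) = 0 := List.count_eq_zero_of_not_mem h
    have : (0 : Int) ≤ (arr.count a : Int) := Int.natCast_nonneg _
    omega
  simp [pvEmit, hm, PySem.List.pyRepeat]

theorem pvEmit_of_not_mem' (arr : List Int) (a : Int) (h : a ∉ arr) :
    pvEmit arr a = [] := by
  have hm : min ((arr.count (-a) : Int)) ((arr.count a : Int)) = 0 := by
    have h0 : arr.count a = 0 := List.count_eq_zero_of_not_mem h
    have : (0 : Int) ≤ (arr.count (-a) : Int) := Int.natCast_nonneg _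
    omega
  simp [pvEmit, hm, PySem.List.pyRepeat]

-- A's loop as a flatMap over the sorted negative keys
theorem pvA_eq_flatMap (arr : List Int) :
    posNegPair arr
      = (PySem.List.sorted (((PySem.Set.ofList arr).filter (fun num => decide (num < 0)))) (fun n => |n|)).flatMap
          (fun num => if arr.contains (-num) then pvEmit arr (-num) else []) := by
  unfold posNegPair
  rw [pvFreq_eq_counter]
  simp only [PySem.Dict.keys_counter]
  have h : ∀ (ans : List Int), ∀ num ∈ PySem.List.sorted ((PySem.Set.ofList arr).filter (fun num => decide (num < 0))) (fun n => |n|),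
      (if (PySem.Dict.counter arr).contains (-num) then
        (PySem.List.pyRange 0 (min ((PySem.Dict.counter arr).getD num 0) ((PySem.Dict.counter arr).getD (-num) 0))).foldl
          (fun a _ => a ++ [num] ++ [-num]) ans
       else ans)
      = ans ++ (if arr.contains (-num) then pvEmit arr (-num) else []) := by
    intro ans num _
    rw [PySem.Dict.contains_counter]
    by_cases hc : (-num) ∈ arr
    · have hb : arr.contains (-num) = true := by
        simp only [List.contains_eq_mem, decide_eq_true_eq]; exact hc
      rw [hb, pvInner_loop]
      simp [pvEmit, PySem.Dict.getD_counter]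
    · simp [hc]
  rw [PySem.List.foldl_congr_mem _ _ _ _ h, PySem.List.foldl_append_eq_flatMap]
  simp

-- the sorted negative keys are exactly the negations of the relevant sorted abs values
theorem pvNeg_sorted (arr : List Int) :
    PySem.List.sorted (((PySem.Set.ofList arr).filter (fun num => decide (num < 0)))) (fun n => |n|)
      = ((PySem.List.sorted (PySem.Set.ofList (arr.map (fun x => |x|))) (fun x => x)).filter
           (fun a => decide (0 < a ∧ (-a) ∈ arr))).map (fun a => -a) := by
  set K := PySem.List.sorted (PySem.Set.ofList (arr.map (fun x => |x|))) (fun x => x) with hK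
  set M := K.filter (fun a => decide (0 < a ∧ (-a) ∈ arr)) with hM
  have hKlt : K.Pairwise (· < ·) := PySem.List.sorted_ofList_pairwise_lt _
  have hMlt : M.Pairwise (· < ·) := List.Pairwise.sublist List.filter_sublist hKlt
  have hMpos : ∀ a ∈ M, 0 < a ∧ (-a) ∈ arr := by
    intro a ha
    have := List.of_mem_filter ha
    simpa using this
  apply PySem.List.sorted_eq_of_perm_of_pairwise_lt
  · -- permutation
    rw [List.perm_ext_iff_of_nodup]
    · intro x
      constructor
      · intro hx
        obtain ⟨a, haM, rfl⟩ := List.mem_map.mp hx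
        obtain ⟨hapos, hain⟩ := hMpos a haM
        refine List.mem_filter.mpr ⟨?_, ?_⟩
        · simpa [PySem.Set.mem_ofList] using hain
        · simp; omega
      · intro hx
        obtain ⟨hxS, hxneg⟩ := List.mem_filter.mp hx
        have hxarr : x ∈ arr := (PySem.Set.mem_ofList arr x).mp hxS
        have hxlt : x < 0 := by simpa using hxneg
        refine List.mem_map.mpr ⟨-x, ?_, by ring⟩
        refine List.mem_filter.mpr ⟨?_, ?_⟩
        · rw [hK, PySem.List.mem_sorted, PySem.Set.mem_ofList]
          refine List.mem_map.mpr ⟨x, hxarr, ?_⟩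
          simp [abs_of_neg hxlt]
        · simp only [decide_eq_true_eq]
          constructor
          · omega
          · simpa using hxarr
    · exact ((hMlt.imp (fun h => ne_of_lt h)).map _ (fun h => by omega))
    · exact (PySem.Set.nodup_ofList arr).filter _
  · -- strictly increasing under the key |·|
    rw [List.pairwise_map]
    refine List.Pairwise.imp_of_mem ?_ hMlt
    intro a b ha hb hlt
    simp only [abs_neg]
    rw [abs_of_pos (hMpos a ha).1, abs_of_pos (hMpos b hb).1]
    exact hlt

-- ===== B-side lemmas =====

-- the distinct abs values in group order, same recursion as pvScanB
def pvKeys : List Int → List Int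
  | [] => []
  | x :: rest => |x| :: pvKeys ((x :: rest).dropWhile (fun y => |y| == |x|))
termination_by s => s.length
decreasing_by
  simp only [List.dropWhile_cons, beq_self_eq_true, if_true]
  have := List.length_dropWhile_le (fun y => |y| == |x|) rest
  simp only [List.length_cons]
  omega

theorem pvKeys_mem (s : List Int) : ∀ a ∈ pvKeys s, ∃ y ∈ s, a = |y| := by
  induction s using pvKeys.induct with
  | case1 => simp [pvKeys]
  | case2 x rest ih =>
    intro a ha
    rw [pvKeys] at ha
    rcases List.mem_cons.mp ha with h | h
    · exact ⟨x, List.mem_cons_self, h⟩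
    · obtain ⟨y, hy, rfl⟩ := ih a h
      exact ⟨y, (List.dropWhile_sublist _).subset hy, rfl⟩

-- elements of the dropped remainder of an abs-sorted list have strictly larger abs
theorem pvDrop_gt_aux (l : List Int) (x : Int)
    (hp : l.Pairwise (fun a b => |a| ≤ |b|)) (hb : ∀ z ∈ l, |x| ≤ |z|) :
    ∀ y ∈ l.dropWhile (fun y => |y| == |x|), |x| < |y| := by
  induction l with
  | nil => simp
  | cons z l' ih =>
    by_cases hz : (|z| == |x|) = true
    · simp only [List.dropWhile_cons, hz, if_true]
      exact ih (List.pairwise_cons.mp hp).2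
        (fun w hw => hb w (List.mem_cons_of_mem _ hw))
    · simp only [List.dropWhile_cons, hz]
      intro y hy
      have hzx : |x| < |z| := by
        have h1 := hb z List.mem_cons_self
        have h2 : ¬ (|z| = |x|) := by simpa using hz
        omega
      rcases List.mem_cons.mp hy with rfl | hy'
      · exact hzx
      · have := (List.pairwise_cons.mp hp).1 y hy'
        omega

theorem pvDrop_gt (x : Int) (rest : List Int)
    (hs : (x :: rest).Pairwise (fun a b => |a| ≤ |b|)) :
    ∀ y ∈ (x :: rest).dropWhile (fun y => |y| == |x|), |x| < |y| := by
  simp only [List.dropWhile_cons, beq_self_eq_true, if_true]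
  exact pvDrop_gt_aux rest x (List.pairwise_cons.mp hs).2 (List.pairwise_cons.mp hs).1

theorem pvGroup_abs (x : Int) (rest : List Int) :
    ∀ y ∈ (x :: rest).takeWhile (fun y => |y| == |x|), |y| = |x| := by
  intro y hy
  have := List.mem_takeWhile_imp hy
  simpa using this

-- count of a value of the head's abs class lives entirely in the head group
theorem pvCount_group (x : Int) (rest : List Int)
    (hs : (x :: rest).Pairwise (fun a b => |a| ≤ |b|))
    (v : Int) (hv : |v| = |x|) :
    (x :: rest).count v = ((x :: rest).takeWhile (fun y => |y| == |x|)).count v := by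
  conv_lhs => rw [← List.takeWhile_append_dropWhile (p := fun y => |y| == |x|) (l := x :: rest)]
  rw [List.count_append]
  have h0 : ((x :: rest).dropWhile (fun y => |y| == |x|)).count v = 0 := by
    apply List.count_eq_zero_of_not_mem
    intro hv'
    have := pvDrop_gt x rest hs v hv'
    omega
  omega

-- count of a larger abs class is untouched by dropping the head group
theorem pvCount_drop (x : Int) (rest : List Int)
    (v : Int) (hv : |x| < |v|) :
    (x :: rest).count v = ((x :: rest).dropWhile (fun y => |y| == |x|)).count v := by
  conv_lhs => rw [← List.takeWhile_append_dropWhile (p := fun y => |y| == |x|) (l := x :: rest)]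
  rw [List.count_append]
  have h0 : ((x :: rest).takeWhile (fun y => |y| == |x|)).count v = 0 := by
    apply List.count_eq_zero_of_not_mem
    intro hv'
    have := pvGroup_abs x rest v hv'
    omega
  omega

-- a flatMap over a replicate
theorem pvFlatMap_replicate {α β : Type} (k : Nat) (c : α) (f : α → List β) :
    (List.replicate k c).flatMap f = (List.replicate k (f c)).flatten := by
  induction k with
  | zero => rfl
  | succ n ih => simp [List.replicate_succ, ih]

-- a group's zipped sign partition is list repetition
theorem pvZip_emit (g : List Int) (a : Int) (ha : 0 < a)
    (hg : ∀ y ∈ g, |y| = a) :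
    ((g.filter (fun v => decide (v < 0))).zip (g.filter (fun v => decide (0 < v)))).foldl
        (fun acc p => acc ++ [p.1, p.2]) []
      = PySem.List.pyRepeat [-a, a] (min ((g.count (-a) : Int)) ((g.count a : Int))) := by
  have hneg : g.filter (fun v => decide (v < 0)) = List.replicate (g.count (-a)) (-a) := by
    rw [List.filter_congr (q := fun v => v == -a) ?_, List.filter_beq]
    intro y hy
    have hya := hg y hy
    by_cases hc : y = -a
    · simp [hc]; omega
    · have hiff : (y < 0) ↔ (y = -a) := by
        rcases abs_cases y with ⟨h1, h2⟩ | ⟨h1, h2⟩ <;> constructor <;> intro <;> omega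
      simp [hiff, hc]
  have hpos : g.filter (fun v => decide (0 < v)) = List.replicate (g.count a) a := by
    rw [List.filter_congr (q := fun v => v == a) ?_, List.filter_beq]
    intro y hy
    have hya := hg y hy
    by_cases hc : y = a
    · simp [hc]; omega
    · have hiff : (0 < y) ↔ (y = a) := by
        rcases abs_cases y with ⟨h1, h2⟩ | ⟨h1, h2⟩ <;> constructor <;> intro <;> omega
      simp [hiff, hc]
  rw [hneg, hpos, List.zip_replicate]
  rw [PySem.List.foldl_append_eq_flatMap (fun p : Int × Int => [p.1, p.2])]
  rw [pvFlatMap_replicate]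
  have hm : (min ((g.count (-a) : Int)) ((g.count a : Int))).toNat = min (g.count (-a)) (g.count a) := by
    omega
  simp [PySem.List.pyRepeat, hm]

theorem pvScanB_eq (s : List Int) (hs : s.Pairwise (fun a b => |a| ≤ |b|)) :
    pvScanB s = (pvKeys s).flatMap
      (fun a => if 0 < a then
          PySem.List.pyRepeat [-a, a] (min ((s.count (-a) : Int)) ((s.count a : Int)))
        else []) := by
  induction s using pvScanB.induct with
  | case1 => simp [pvScanB, pvKeys]
  | case2 x rest ih =>
    have ht : ((x :: rest).dropWhile (fun y => |y| == |x|)).Pairwise (fun a b => |a| ≤ |b|) :=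
      List.Pairwise.sublist (List.dropWhile_sublist _) hs
    rw [pvScanB, pvKeys, List.flatMap_cons]
    congr 1
    · -- head group emission
      by_cases hx : x = 0
      · subst hx
        simp
      · have hxa : (0:Int) < |x| := by
          rcases lt_or_gt_of_ne hx with h | h
          · have := abs_of_neg h; omega
          · have := abs_of_pos h; omega
        rw [if_pos hx, if_pos hxa]
        rw [pvZip_emit _ |x| hxa (pvGroup_abs x rest)]
        rw [← pvCount_group x rest hs (-|x|) (by simp), ← pvCount_group x rest hs |x| (by simp)]
    · -- remainder via IH
      rw [ih ht]
      apply List.flatMap_congr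
      intro a ha
      obtain ⟨y, hy, rfl⟩ := pvKeys_mem _ _ ha
      have hgt : |x| < |y| := pvDrop_gt x rest hs y hy
      rw [← pvCount_drop x rest (-|y|) (by rw [abs_neg, abs_abs]; omega),
          ← pvCount_drop x rest |y| (by rw [abs_abs]; omega)]

theorem pvKeys_pairwise (s : List Int) (hs : s.Pairwise (fun a b => |a| ≤ |b|)) :
    (pvKeys s).Pairwise (· < ·) := by
  induction s using pvKeys.induct with
  | case1 => simp [pvKeys]
  | case2 x rest ih =>
    rw [pvKeys]
    refine List.pairwise_cons.mpr ⟨?_, ih (List.Pairwise.sublist (List.dropWhile_sublist _) hs)⟩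
    intro a ha
    obtain ⟨y, hy, rfl⟩ := pvKeys_mem _ _ ha
    exact pvDrop_gt x rest hs y hy

theorem pvKeys_mem_of (s : List Int) (y : Int) (hy : y ∈ s) : |y| ∈ pvKeys s := by
  induction s using pvKeys.induct with
  | case1 => simp at hy
  | case2 x rest ih =>
    rw [pvKeys]
    by_cases h : |y| = |x|
    · simp [h]
    · refine List.mem_cons_of_mem _ (ih ?_)
      have := List.takeWhile_append_dropWhile (p := fun y => |y| == |x|) (l := x :: rest)
      have hy' : y ∈ (x :: rest).takeWhile (fun y => |y| == |x|) ++
          (x :: rest).dropWhile (fun y => |y| == |x|) := by rw [this]; exact hy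
      rcases List.mem_append.mp hy' with hg | htl
      · exact absurd (pvGroup_abs x rest y hg) h
      · exact htl

theorem pvKeys_sorted (arr : List Int) :
    pvKeys (PySem.List.sorted arr (fun x => |x|))
      = PySem.List.sorted (PySem.Set.ofList (arr.map (fun x => |x|))) (fun x => x) := by
  set s := PySem.List.sorted arr (fun x => |x|) with hsdef
  have hs : s.Pairwise (fun a b => |a| ≤ |b|) := PySem.List.sorted_pairwise arr (fun x => |x|)
  have hperm : s.Perm arr := PySem.List.sorted_perm arr (fun x => |x|) false
  have hlt := pvKeys_pairwise s hs
  refine (PySem.List.sorted_eq_of_perm_of_pairwise_lt _ _ _ ?_ ?_).symm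
  · rw [List.perm_ext_iff_of_nodup (hlt.imp ne_of_lt) (PySem.Set.nodup_ofList _)]
    intro a
    rw [PySem.Set.mem_ofList]
    constructor
    · intro ha
      obtain ⟨y, hy, rfl⟩ := pvKeys_mem s a ha
      exact List.mem_map.mpr ⟨y, hperm.subset hy, rfl⟩
    · intro ha
      obtain ⟨y, hy, rfl⟩ := List.mem_map.mp ha
      exact pvKeys_mem_of s y (hperm.symm.subset hy)
  · exact hlt

-- B's scan as the same flatMap over the sorted distinct abs values
theorem pvB_eq_flatMap (arr : List Int) :
    posNegPair_alt arr
      = (PySem.List.sorted (PySem.Set.ofList (arr.map (fun x => |x|))) (fun x => x)).flatMap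
          (fun a => if 0 < a then pvEmit arr a else []) := by
  unfold posNegPair_alt
  rw [pvScanB_eq _ (PySem.List.sorted_pairwise arr (fun x => |x|)), pvKeys_sorted]
  apply List.flatMap_congr
  intro a _
  have hc : ∀ v : Int, (PySem.List.sorted arr (fun x => |x|)).count v = arr.count v :=
    fun v => (PySem.List.sorted_perm arr (fun x => |x|) false).count_eq v
  rw [hc, hc]
  rfl

-- ===== VERDICT (by name: the statement is the Claim_ definition above) =====
theorem posNegPair_spec : Claim_equal_posNegPair := by
  intro arr _
  unfold Spec_posNegPair
  rw [pvA_eq_flatMap, pvB_eq_flatMap, pvNeg_sorted]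
  set K := PySem.List.sorted (PySem.Set.ofList (arr.map (fun x => |x|))) (fun x => x) with hK
  have hKnn : ∀ a ∈ K, 0 ≤ a := by
    intro a ha
    rw [hK, PySem.List.mem_sorted, PySem.Set.mem_ofList] at ha
    obtain ⟨x, _, rfl⟩ := List.mem_map.mp ha
    exact abs_nonneg x
  rw [pvFlatMap_filter K (fun a => 0 < a ∧ (-a) ∈ arr) _ ?vanish]
  case vanish =>
    intro a haK hnot
    by_cases h0 : 0 < a
    · have hnin : (-a) ∉ arr := by tauto
      simp [h0, pvEmit_of_not_mem arr a hnin]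
    · simp [h0]
  rw [List.flatMap_map]
  apply List.flatMap_congr
  intro a ha
  obtain ⟨haK, hcond⟩ := List.mem_filter.mp ha
  simp only [decide_eq_true_eq] at hcond
  obtain ⟨hpos, hneg⟩ := hcond
  simp only [neg_neg, hpos, if_true]
  by_cases hmem : a ∈ arr
  · simp [hmem, pvEmit]
  · simp [pvEmit_of_not_mem' arr a hmem]
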